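-- pv_equiv track=rewrite | github.com/deepset-ai/FARM | farm/utils.py | convert_iob_to_simple_tags
-- ===== SOURCE A (Python) =====
-- def convert_iob_to_simple_tags(preds, spans):
--     contains_named_entity = len([x for x in preds if "B-" in x]) != 0
--     simple_tags = []
--     merged_spans = []
--     open_tag = False
--     for pred, span in zip(preds, spans):
--         # no entity
--         if not ("B-" in pred or "I-" in pred):
--             if open_tag:
--                 # end of one tag
--                 merged_spans.append(cur_span)
--                 simple_tags.append(cur_tag)
--                 open_tag = False
--             continue
--
--         # new span starting
--         elif "B-" in pred:
--             if open_tag: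
--                 # end of one tag
--                 merged_spans.append(cur_span)
--                 simple_tags.append(cur_tag)
--             cur_tag = pred.replace("B-", "")
--             cur_span = span
--             open_tag = True
--
--         elif "I-" in pred:
--             this_tag = pred.replace("I-", "")
--             if open_tag and this_tag == cur_tag:
--                 cur_span = (cur_span[0], span[1])
--             elif open_tag:
--                 # end of one tag
--                 merged_spans.append(cur_span)
--                 simple_tags.append(cur_tag)
--                 open_tag = False
--     if open_tag:
--         merged_spans.append(cur_span)
--         simple_tags.append(cur_tag)
--         open_tag = False
--     if contains_named_entity and len(simple_tags) == 0:
--         raise Exception("Predicted Named Entities lost when converting from IOB to simple tags. Please check the format"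
--                         "of the training data adheres to either adheres to IOB2 format or is converted when "
--                         "read_ner_file() is called.")
--     return simple_tags, merged_spans
-- ===== SOURCE B (Python) =====
-- def convert_iob_to_simple_tags(preds, spans):
--     pairs = list(zip(preds, spans))
--     simple_tags = []
--     merged_spans = []
--     n = len(pairs)
--     i = 0
--     while i < n:
--         pred, span = pairs[i]
--         if "B-" in pred:
--             cur_tag = pred.replace("B-", "")
--             cur_span = span
--             j = i + 1
--             while (j < n and "B-" not in pairs[j][0] and "I-" in pairs[j][0]
--                    and pairs[j][0].replace("I-", "") == cur_tag):
--                 cur_span = (cur_span[0], pairs[j][1][1])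
--                 j += 1
--             simple_tags.append(cur_tag)
--             merged_spans.append(cur_span)
--             i = j
--         else:
--             i += 1
--     if not simple_tags and any("B-" in x for x in preds):
--         raise Exception("Predicted Named Entities lost when converting from IOB to simple tags. Please check the format"
--                         "of the training data adheres to either adheres to IOB2 format or is converted when "
--                         "read_ner_file() is called.")
--     return simple_tags, merged_spans
-- ===== Notes on version B (the rewrite author's own statement) =====
-- stated objective: alternative
-- what changed: Replaces A's single fold that threads an open_tag/cur_tag/cur_span state machine across every token by a two-pointer scan: an outer index finds each B- token and an inner pointer consumes its I- continuation run at once, emitting the merged entity immediately; no open/close state survives between entities.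
import Mathlib
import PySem

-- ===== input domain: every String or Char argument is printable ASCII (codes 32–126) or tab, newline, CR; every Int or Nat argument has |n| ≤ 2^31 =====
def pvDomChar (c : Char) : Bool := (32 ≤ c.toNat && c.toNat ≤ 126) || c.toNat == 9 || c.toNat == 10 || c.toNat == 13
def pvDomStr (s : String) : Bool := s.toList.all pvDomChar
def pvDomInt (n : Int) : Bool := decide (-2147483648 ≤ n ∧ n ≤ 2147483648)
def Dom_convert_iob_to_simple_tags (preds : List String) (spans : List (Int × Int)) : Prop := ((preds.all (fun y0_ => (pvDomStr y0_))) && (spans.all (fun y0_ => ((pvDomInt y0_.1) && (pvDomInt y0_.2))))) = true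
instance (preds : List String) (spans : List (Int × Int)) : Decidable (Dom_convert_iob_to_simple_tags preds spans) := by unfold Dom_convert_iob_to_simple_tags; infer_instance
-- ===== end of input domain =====

-- B replaces A's open_tag state machine fold by a two-pointer scan (outer scan to each B- token,
-- inner run consuming its I- continuation); same return value on all inputs where A returns.

-- ===== PORT A =====
-- one step of A's for-loop; state = (simple_tags, merged_spans, open_tag as Option (cur_tag, cur_span))
def pvA_step (st : List String × List (Int × Int) × Option (String × (Int × Int)))
    (p : String × (Int × Int)) : List String × List (Int × Int) × Option (String × (Int × Int)) :=
  let (tags, ms, op) := st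
  if !(PySem.Str.isIn "B-" p.1 || PySem.Str.isIn "I-" p.1) then
    match op with
    | some (t, sp) => (tags ++ [t], ms ++ [sp], none)
    | none => (tags, ms, none)
  else if PySem.Str.isIn "B-" p.1 then
    match op with
    | some (t, sp) => (tags ++ [t], ms ++ [sp], some (PySem.Str.replace p.1 "B-" "", p.2))
    | none => (tags, ms, some (PySem.Str.replace p.1 "B-" "", p.2))
  else
    let this_tag := PySem.Str.replace p.1 "I-" ""
    match op with
    | some (t, sp) =>
      if this_tag == t then (tags, ms, some (t, (sp.1, p.2.2)))
      else (tags ++ [t], ms ++ [sp], none)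
    | none => (tags, ms, none)

-- the final 'raise' of A fires exactly on the inputs Pre_ excludes; on those the port's value is unclaimed
def convert_iob_to_simple_tags (preds : List String) (spans : List (Int × Int)) :
    List String × (List (Int × Int)) :=
  let st := (preds.zip spans).foldl pvA_step ([], [], none)
  match st with
  | (tags, ms, some (t, sp)) => (tags ++ [t], ms ++ [sp])
  | (tags, ms, none) => (tags, ms)

-- ===== PORT B =====
-- inner pointer: consume the I- continuation run of an open entity, returning the merged span and the rest
def pvB_extend (t : String) (sp : Int × Int) (rest : List (String × (Int × Int))) :
    (Int × Int) × List (String × (Int × Int)) :=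
  match rest with
  | [] => (sp, [])
  | (p, s2) :: tl =>
    if !PySem.Str.isIn "B-" p && PySem.Str.isIn "I-" p && (PySem.Str.replace p "I-" "" == t) then
      pvB_extend t (sp.1, s2.2) tl
    else (sp, (p, s2) :: tl)

theorem pvB_extend_len (t : String) (sp : Int × Int) (rest : List (String × (Int × Int))) :
    (pvB_extend t sp rest).2.length ≤ rest.length := by
  induction rest generalizing sp with
  | nil => simp [pvB_extend]
  | cons h tl ih =>
    simp only [pvB_extend]
    split
    · exact le_trans (ih _) (Nat.le_succ _)
    · simp

-- outer scan: find each B- token, merge its run, emit, resume after the run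
def pvB_walk : List (String × (Int × Int)) → List String × List (Int × Int)
  | [] => ([], [])
  | (p, s2) :: tl =>
    if PySem.Str.isIn "B-" p then
      let e := pvB_extend (PySem.Str.replace p "B-" "") s2 tl
      let r := pvB_walk e.2
      (PySem.Str.replace p "B-" "" :: r.1, e.1 :: r.2)
    else pvB_walk tl
  termination_by l => l.length
  decreasing_by
  · exact Nat.lt_succ_of_le (pvB_extend_len _ _ _)
  · simp

-- the final 'raise' of B fires on exactly the inputs Pre_ excludes
def convert_iob_to_simple_tags_alt (preds : List String) (spans : List (Int × Int)) :
    List String × (List (Int × Int)) :=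
  pvB_walk (preds.zip spans)

-- ===== PRECONDITION & SPEC =====
-- Pre_ excludes exactly the inputs on which A raises its final Exception: some pred contains "B-"
-- but no pred in the zipped prefix (the first spans.length preds) does, so no tag is ever emitted.
def Pre_convert_iob_to_simple_tags (preds : List String) (spans : List (Int × Int)) : Prop :=
  (∃ x ∈ preds, PySem.Str.isIn "B-" x = true) →
    (∃ x ∈ preds.take spans.length, PySem.Str.isIn "B-" x = true)
instance (preds : List String) (spans : List (Int × Int)) : Decidable (Pre_convert_iob_to_simple_tags preds spans) := by unfold Pre_convert_iob_to_simple_tags; infer_instance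

def pvWitness_convert_iob_to_simple_tags : List String × (List (Int × Int)) :=
  (["B-PER", "I-PER", "O", "B-LOC"], [(0, 1), (1, 2), (2, 3), (3, 4)])

def Spec_convert_iob_to_simple_tags (preds : List String) (spans : List (Int × Int)) (out : List String × (List (Int × Int))) : Prop := out = convert_iob_to_simple_tags_alt preds spans
instance (preds : List String) (spans : List (Int × Int)) (out : List String × (List (Int × Int))) : Decidable (Spec_convert_iob_to_simple_tags preds spans out) := by unfold Spec_convert_iob_to_simple_tags; infer_instance

-- ===== CLAIM (what is proved, stated in full; the proofs are below) =====
def Claim_equal_convert_iob_to_simple_tags : Prop := ∀ (preds : List String) (spans : List (Int × Int)), Dom_convert_iob_to_simple_tags preds spans → Pre_convert_iob_to_simple_tags preds spans → Spec_convert_iob_to_simple_tags preds spans (convert_iob_to_simple_tags preds spans)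

-- ===== LEMMAS AND PROOFS =====

-- closing step of A (the trailing 'if open_tag' after the loop)
def pvA_close (st : List String × List (Int × Int) × Option (String × (Int × Int))) :
    List String × List (Int × Int) :=
  match st with
  | (tags, ms, some (t, sp)) => (tags ++ [t], ms ++ [sp])
  | (tags, ms, none) => (tags, ms)

theorem pvAB (l : List (String × (Int × Int))) :
    (∀ ts ms, pvA_close (l.foldl pvA_step (ts, ms, none)) =
      (ts ++ (pvB_walk l).1, ms ++ (pvB_walk l).2))
    ∧ (∀ ts ms t sp, pvA_close (l.foldl pvA_step (ts, ms, some (t, sp))) =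
      (ts ++ t :: (pvB_walk (pvB_extend t sp l).2).1,
       ms ++ (pvB_extend t sp l).1 :: (pvB_walk (pvB_extend t sp l).2).2)) := by
  induction l with
  | nil => simp [pvA_close, pvB_walk, pvB_extend]
  | cons hd tl ih =>
    obtain ⟨p, s2⟩ := hd
    obtain ⟨ih1, ih2⟩ := ih
    by_cases hB : PySem.Str.isIn "B-" p = true
    · have hBc : PySem.Chars.isIn ['B', '-'] p.toList = true := hB
      refine ⟨fun ts ms => ?_, fun ts ms t sp => ?_⟩
      · have hstep : pvA_step (ts, ms, none) (p, s2) =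
            (ts, ms, some (PySem.Str.replace p "B-" "", s2)) := by
          simp [pvA_step, hBc]
        rw [List.foldl_cons, hstep, ih2, pvB_walk, if_pos hB]
      · have hstep : pvA_step (ts, ms, some (t, sp)) (p, s2) =
            (ts ++ [t], ms ++ [sp], some (PySem.Str.replace p "B-" "", s2)) := by
          simp [pvA_step, hBc]
        have hx : pvB_extend t sp ((p, s2) :: tl) = (sp, (p, s2) :: tl) := by
          rw [pvB_extend]; simp [hBc]
        rw [List.foldl_cons, hstep, ih2, hx, pvB_walk, if_pos hB]
        simp
    · have hBc : PySem.Chars.isIn ['B', '-'] p.toList = false := eq_false_of_ne_true hB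
      by_cases hI : PySem.Str.isIn "I-" p = true
      · -- I- token (no B-)
        have hIc : PySem.Chars.isIn ['I', '-'] p.toList = true := hI
        refine ⟨fun ts ms => ?_, fun ts ms t sp => ?_⟩
        · have hstep : pvA_step (ts, ms, none) (p, s2) = (ts, ms, none) := by
            simp [pvA_step, hBc, hIc]
          rw [List.foldl_cons, hstep, ih1, pvB_walk, if_neg hB]
        · by_cases ht : PySem.Str.replace p "I-" "" = t
          · have hstep : pvA_step (ts, ms, some (t, sp)) (p, s2) =
                (ts, ms, some (t, (sp.1, s2.2))) := by
              simp [pvA_step, hBc, hIc, ht]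
            have hx : pvB_extend t sp ((p, s2) :: tl) = pvB_extend t (sp.1, s2.2) tl := by
              rw [pvB_extend]; simp [hBc, hIc, ht]
            rw [List.foldl_cons, hstep, ih2, hx]
          · have hstep : pvA_step (ts, ms, some (t, sp)) (p, s2) =
                (ts ++ [t], ms ++ [sp], none) := by
              simp [pvA_step, hBc, hIc, ht]
            have hx : pvB_extend t sp ((p, s2) :: tl) = (sp, (p, s2) :: tl) := by
              rw [pvB_extend]; simp [hBc, hIc, ht]
            rw [List.foldl_cons, hstep, ih1, hx, pvB_walk, if_neg hB]
            simp
      · -- neither B- nor I-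
        have hIc : PySem.Chars.isIn ['I', '-'] p.toList = false := eq_false_of_ne_true hI
        refine ⟨fun ts ms => ?_, fun ts ms t sp => ?_⟩
        · have hstep : pvA_step (ts, ms, none) (p, s2) = (ts, ms, none) := by
            simp [pvA_step, hBc, hIc]
          rw [List.foldl_cons, hstep, ih1, pvB_walk, if_neg hB]
        · have hstep : pvA_step (ts, ms, some (t, sp)) (p, s2) =
              (ts ++ [t], ms ++ [sp], none) := by
            simp [pvA_step, hBc, hIc]
          have hx : pvB_extend t sp ((p, s2) :: tl) = (sp, (p, s2) :: tl) := by
            rw [pvB_extend]; simp [hIc]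
          rw [List.foldl_cons, hstep, ih1, hx, pvB_walk, if_neg hB]
          simp

-- ===== VERDICT (by name: the statement is the Claim_ definition above) =====
theorem convert_iob_to_simple_tags_spec : Claim_equal_convert_iob_to_simple_tags := by
  intro preds spans _ _
  unfold Spec_convert_iob_to_simple_tags convert_iob_to_simple_tags convert_iob_to_simple_tags_alt
  have h := (pvAB (preds.zip spans)).1 [] []
  simp only [pvA_close, List.nil_append] at h
  exact h
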